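-- pv_equiv track=rewrite | github.com/profbrandongassaway/Map-Kinase | MapKinase_WebApp/search_pathways/add_wiki_annos_to_transferfile.py | _collect_xrefs
-- ===== SOURCE A (Python) =====
-- from typing import Dict, List, Optional, Tuple
--
-- def _collect_xrefs(payload: Dict) -> Dict[str, List[str]]:
--     xrefs: Dict[str, List[str]] = {}
--     items = payload.get("uniProtKBCrossReferences") or []
--     for item in items:
--         db = item.get("database")
--         if not db:
--             continue
--         xrefs.setdefault(db, []).append(item.get("id") or "")
--     return xrefs
-- ===== SOURCE B (Python) =====
-- def _collect_xrefs(payload):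
--     items = payload.get("uniProtKBCrossReferences") or []
--     dbs = []
--     for item in items:
--         db = item.get("database")
--         if db and db not in dbs:
--             dbs.append(db)
--     return {db: [item.get("id") or "" for item in items
--                  if item.get("database") == db]
--             for db in dbs}
-- ===== Notes on version B (the rewrite author's own statement) =====
-- stated objective: alternative
-- what changed: Replaces the single-pass setdefault/append accumulation with a two-phase strategy: one pass collects the distinct truthy database names in first-appearance order, then a dict comprehension rebuilds each group by filtering the items per database.
import Mathlib
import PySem

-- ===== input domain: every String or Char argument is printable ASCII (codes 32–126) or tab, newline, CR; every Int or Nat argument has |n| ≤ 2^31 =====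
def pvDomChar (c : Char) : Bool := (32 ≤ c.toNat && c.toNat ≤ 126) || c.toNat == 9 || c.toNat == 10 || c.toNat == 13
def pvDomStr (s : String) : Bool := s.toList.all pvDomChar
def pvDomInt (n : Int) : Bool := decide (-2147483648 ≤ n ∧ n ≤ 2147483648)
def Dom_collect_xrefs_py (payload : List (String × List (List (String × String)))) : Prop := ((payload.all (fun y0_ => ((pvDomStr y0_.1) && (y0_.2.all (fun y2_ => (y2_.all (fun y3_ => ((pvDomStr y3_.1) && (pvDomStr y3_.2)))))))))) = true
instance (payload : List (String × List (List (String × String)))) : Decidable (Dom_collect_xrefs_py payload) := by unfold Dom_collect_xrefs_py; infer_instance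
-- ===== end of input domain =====

-- B replaces A's single-pass setdefault/append grouping by a two-phase strategy (collect distinct
-- database names in first-appearance order, then filter the items once per database); alternative, not faster.


-- ===== PORT A =====
-- xrefs.setdefault(db, []).append(v): append v to db's bucket in place, or append a new (db, [v]) at the end
def pvSetdefApp : List (String × List String) → String → String → List (String × List String)
  | [], db, v => [(db, [v])]
  | (k, vs) :: rest, db, v =>
      if k = db then (k, vs ++ [v]) :: rest else (k, vs) :: pvSetdefApp rest db v

def collect_xrefs_py (payload : List (String × List (List (String × String)))) : List (String × List String) :=
  -- items = payload.get("uniProtKBCrossReferences") or []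
  let items := (List.lookup "uniProtKBCrossReferences" payload).getD []
  items.foldl
    (fun xrefs item =>
      match List.lookup "database" item with
      | none => xrefs                                    -- "if not db: continue"
      | some db =>
          if db = "" then xrefs
          else pvSetdefApp xrefs db ((List.lookup "id" item).getD ""))   -- item.get("id") or ""
    []

-- ===== PORT B =====
def collect_xrefs_py_alt (payload : List (String × List (List (String × String)))) : List (String × List String) :=
  let items := (List.lookup "uniProtKBCrossReferences" payload).getD []
  -- pass 1: distinct truthy database names, first-appearance order
  let dbs := items.foldl
    (fun acc item =>
      match List.lookup "database" item with
      | none => acc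
      | some db => if db ≠ "" && !acc.contains db then acc ++ [db] else acc)
    []
  -- pass 2: dict comprehension — per database, filter the items and take their ids
  dbs.map (fun db =>
    (db, (items.filter (fun item => List.lookup "database" item == some db)).map
           (fun item => (List.lookup "id" item).getD "")))

-- ===== PRECONDITION & SPEC =====
def Spec_collect_xrefs_py (payload : List (String × List (List (String × String)))) (out : List (String × List String)) : Prop := out = collect_xrefs_py_alt payload
instance (payload : List (String × List (List (String × String)))) (out : List (String × List String)) : Decidable (Spec_collect_xrefs_py payload out) := by unfold Spec_collect_xrefs_py; infer_instance

-- ===== CLAIM (what is proved, stated in full; the proofs are below) =====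
def Claim_equal_collect_xrefs_py : Prop := ∀ (payload : List (String × List (List (String × String)))), Dom_collect_xrefs_py payload → Spec_collect_xrefs_py payload (collect_xrefs_py payload)

-- ===== LEMMAS AND PROOFS =====

-- abbreviations used only in the proofs
def pvDb (item : List (String × String)) : Option String := List.lookup "database" item
def pvId (item : List (String × String)) : String := (List.lookup "id" item).getD ""

def pvStepA (xrefs : List (String × List String)) (item : List (String × String)) : List (String × List String) :=
  match pvDb item with
  | none => xrefs
  | some db => if db = "" then xrefs else pvSetdefApp xrefs db (pvId item)

def pvStepD (acc : List String) (item : List (String × String)) : List String :=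
  match pvDb item with
  | none => acc
  | some db => if db ≠ "" && !acc.contains db then acc ++ [db] else acc

def pvGroup (items : List (List (String × String))) (db : String) : List String :=
  (items.filter (fun item => pvDb item == some db)).map pvId

lemma setdefApp_map_mem (keys : List String) (v : String → List String) (db x : String)
    (hnd : keys.Nodup) (hmem : db ∈ keys) :
    pvSetdefApp (keys.map (fun k => (k, v k))) db x
      = keys.map (fun k => (k, if k = db then v k ++ [x] else v k)) := by
  induction keys with
  | nil => simp at hmem
  | cons k ks ih =>
    simp only [List.map_cons, pvSetdefApp]
    rcases List.nodup_cons.mp hnd with ⟨hk, hnd'⟩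
    by_cases hkdb : k = db
    · subst hkdb
      rw [if_pos rfl]
      refine List.cons_eq_cons.mpr ⟨by simp, ?_⟩
      apply List.map_congr_left
      intro a ha
      have hak : ¬ a = k := fun h => hk (h ▸ ha)
      simp [hak]
    · have hmem' : db ∈ ks := by
        rcases List.mem_cons.mp hmem with h | h
        · exact absurd h.symm hkdb
        · exact h
      simp [hkdb, ih hnd' hmem']

lemma setdefApp_map_not_mem (keys : List String) (v : String → List String) (db x : String)
    (hmem : db ∉ keys) :
    pvSetdefApp (keys.map (fun k => (k, v k))) db x
      = keys.map (fun k => (k, v k)) ++ [(db, [x])] := by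
  induction keys with
  | nil => simp [pvSetdefApp]
  | cons k ks ih =>
    have hk : k ≠ db := fun h => hmem (h ▸ List.mem_cons_self)
    have hks : db ∉ ks := fun h => hmem (List.mem_cons_of_mem _ h)
    simp [pvSetdefApp, hk, ih hks]

-- main invariant, by induction on the item list from the right
lemma main_inv (items : List (List (String × String))) :
    (items.foldl pvStepA [] = (items.foldl pvStepD []).map (fun db => (db, pvGroup items db)))
    ∧ (items.foldl pvStepD []).Nodup
    ∧ (∀ db, db ∈ items.foldl pvStepD [] ↔ db ≠ "" ∧ ∃ it ∈ items, pvDb it = some db) := by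
  induction items using List.reverseRecOn with
  | nil => simp [pvGroup]
  | append_singleton xs it ih =>
    obtain ⟨hA, hnd, hmem⟩ := ih
    have hne : ∀ db ∈ xs.foldl pvStepD [], db ≠ "" := fun db h => ((hmem db).mp h).1
    have hgroup : ∀ db, pvGroup (xs ++ [it]) db
        = pvGroup xs db ++ (if pvDb it == some db then [pvId it] else []) := by
      intro db
      simp only [pvGroup, List.filter_append, List.map_append, List.filter]
      by_cases h : pvDb it == some db <;> simp [h]
    have hmemext : ∀ db, (db ≠ "" ∧ ∃ it' ∈ xs, pvDb it' = some db) →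
        (db ≠ "" ∧ ∃ it' ∈ xs ++ [it], pvDb it' = some db) := by
      rintro db ⟨h1, it', h2, h3⟩; exact ⟨h1, it', List.mem_append_left _ h2, h3⟩
    rw [List.foldl_append, List.foldl_append, hA]
    simp only [List.foldl_cons, List.foldl_nil]
    rcases hdb : pvDb it with _ | db₀
    · -- no "database" key: both steps are no-ops
      have hsA : ∀ S, pvStepA S it = S := by intro S; simp [pvStepA, hdb]
      have hsD : ∀ S, pvStepD S it = S := by intro S; simp [pvStepD, hdb]
      rw [hsA, hsD]
      refine ⟨?_, hnd, ?_⟩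
      · apply List.map_congr_left
        intro db _
        rw [hgroup db, hdb]
        simp
      · intro db
        rw [hmem db]
        refine ⟨hmemext db, ?_⟩
        rintro ⟨h1, it', h2, h3⟩
        rcases List.mem_append.mp h2 with h | h
        · exact ⟨h1, it', h, h3⟩
        · simp at h; subst h; rw [hdb] at h3; exact absurd h3 (by simp)
    · by_cases hempty : db₀ = ""
      · -- empty database name: skipped by both
        subst hempty
        have hsA : ∀ S, pvStepA S it = S := by intro S; simp [pvStepA, hdb]
        have hsD : ∀ S, pvStepD S it = S := by intro S; simp [pvStepD, hdb]
        rw [hsA, hsD]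
        refine ⟨?_, hnd, ?_⟩
        · apply List.map_congr_left
          intro db hdbm
          rw [hgroup db, hdb]
          have : db ≠ "" := hne db hdbm
          simp [Ne.symm this]
        · intro db
          rw [hmem db]
          refine ⟨hmemext db, ?_⟩
          rintro ⟨h1, it', h2, h3⟩
          rcases List.mem_append.mp h2 with h | h
          · exact ⟨h1, it', h, h3⟩
          · simp at h; subst h; rw [hdb] at h3
            exact absurd (Option.some.inj h3).symm h1
      · by_cases hin : db₀ ∈ xs.foldl pvStepD []
        · -- existing database: the bucket grows in place, the key list is unchanged
          have hc : (xs.foldl pvStepD []).contains db₀ = true := by simpa using hin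
          have hsD : pvStepD (xs.foldl pvStepD []) it = xs.foldl pvStepD [] := by
            simp only [pvStepD, hdb, hc, Bool.not_true, Bool.and_false]
            simp
          have hsA : pvStepA ((xs.foldl pvStepD []).map (fun db => (db, pvGroup xs db))) it
              = pvSetdefApp ((xs.foldl pvStepD []).map (fun db => (db, pvGroup xs db))) db₀ (pvId it) := by
            simp [pvStepA, hdb, hempty]
          rw [hsA, hsD]
          refine ⟨?_, hnd, ?_⟩
          · rw [setdefApp_map_mem _ _ _ _ hnd hin]
            apply List.map_congr_left
            intro db hdbm
            rw [hgroup db, hdb]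
            by_cases h : db = db₀
            · subst h; simp
            · simp [h, Ne.symm h]
          · intro db
            rw [hmem db]
            refine ⟨hmemext db, ?_⟩
            rintro ⟨h1, it', h2, h3⟩
            rcases List.mem_append.mp h2 with h | h
            · exact ⟨h1, it', h, h3⟩
            · simp at h; subst h; rw [hdb] at h3
              have hdd : db = db₀ := (Option.some.inj h3).symm
              subst hdd; exact (hmem db).mp hin
        · -- new database: appended at the end on both sides
          have hc : (xs.foldl pvStepD []).contains db₀ = false := by simpa using hin
          have hfresh : pvGroup xs db₀ = [] := by
            simp only [pvGroup, List.map_eq_nil_iff, List.filter_eq_nil_iff]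
            intro it' h2 h3
            have : pvDb it' = some db₀ := by simpa using h3
            exact hin ((hmem db₀).mpr ⟨hempty, it', h2, this⟩)
          have hsD : pvStepD (xs.foldl pvStepD []) it = xs.foldl pvStepD [] ++ [db₀] := by
            simp only [pvStepD, hdb, hc, Bool.not_false, Bool.and_true]
            simp [hempty]
          have hsA : pvStepA ((xs.foldl pvStepD []).map (fun db => (db, pvGroup xs db))) it
              = pvSetdefApp ((xs.foldl pvStepD []).map (fun db => (db, pvGroup xs db))) db₀ (pvId it) := by
            simp [pvStepA, hdb, hempty]
          rw [hsA, hsD]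
          refine ⟨?_, ?_, ?_⟩
          · rw [setdefApp_map_not_mem _ _ _ _ hin, List.map_append]
            congr 1
            · apply List.map_congr_left
              intro db hdbm
              rw [hgroup db, hdb]
              have hne' : db ≠ db₀ := fun h => hin (h ▸ hdbm)
              simp [Ne.symm hne']
            · simp [hgroup db₀, hdb, hfresh]
          · exact List.Nodup.append hnd (List.nodup_singleton _) (by simpa using hin)
          · intro db
            constructor
            · intro h
              rcases List.mem_append.mp h with h | h
              · exact hmemext db ((hmem db).mp h)
              · rw [List.mem_singleton] at h; subst h
                exact ⟨hempty, it, List.mem_append_right _ List.mem_cons_self, hdb⟩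
            · rintro ⟨h1, it', h2, h3⟩
              rcases List.mem_append.mp h2 with h | h
              · exact List.mem_append_left _ ((hmem db).mpr ⟨h1, it', h, h3⟩)
              · rw [List.mem_singleton] at h; subst h; rw [hdb] at h3
                have hdd : db = db₀ := (Option.some.inj h3).symm
                subst hdd
                exact List.mem_append_right _ List.mem_cons_self

-- ===== VERDICT (by name: the statement is the Claim_ definition above) =====
theorem collect_xrefs_py_spec : Claim_equal_collect_xrefs_py := by
  intro payload _
  show collect_xrefs_py payload = collect_xrefs_py_alt payload
  unfold collect_xrefs_py collect_xrefs_py_alt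
  exact (main_inv ((List.lookup "uniProtKBCrossReferences" payload).getD [])).1
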